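-- pv_equiv track=rewrite | github.com/PyroMantra/warpedoriginal | SentientGen.py | get_highest_affordable_rarity
-- ===== SOURCE A (Python) =====
-- def get_highest_affordable_rarity(current_gold):
--     prices = {
--         "Mythic": 2000, "Legendary": 1000, "Epic": 800,
--         "Rare": 600, "Uncommon": 400, "Common": 200
--     }
--     for rarity, cost in prices.items():
--         if current_gold >= cost:
--             return rarity
--     return "None (Too Poor)"
-- ===== SOURCE B (Python) =====
-- def get_highest_affordable_rarity(current_gold):
--     prices = {
--         "Mythic": 2000, "Legendary": 1000, "Epic": 800,
--         "Rare": 600, "Uncommon": 400, "Common": 200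
--     }
--     affordable = [(cost, rarity) for rarity, cost in prices.items() if cost <= current_gold]
--     if not affordable:
--         return "None (Too Poor)"
--     return max(affordable)[1]
-- ===== Notes on version B (the rewrite author's own statement) =====
-- stated objective: alternative
-- what changed: Replaced the insertion-order early-return scan (which relies on the dict being sorted by descending cost) with a filter of affordable (cost, rarity) pairs followed by an argmax over cost, so ordering no longer matters.
import Mathlib
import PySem

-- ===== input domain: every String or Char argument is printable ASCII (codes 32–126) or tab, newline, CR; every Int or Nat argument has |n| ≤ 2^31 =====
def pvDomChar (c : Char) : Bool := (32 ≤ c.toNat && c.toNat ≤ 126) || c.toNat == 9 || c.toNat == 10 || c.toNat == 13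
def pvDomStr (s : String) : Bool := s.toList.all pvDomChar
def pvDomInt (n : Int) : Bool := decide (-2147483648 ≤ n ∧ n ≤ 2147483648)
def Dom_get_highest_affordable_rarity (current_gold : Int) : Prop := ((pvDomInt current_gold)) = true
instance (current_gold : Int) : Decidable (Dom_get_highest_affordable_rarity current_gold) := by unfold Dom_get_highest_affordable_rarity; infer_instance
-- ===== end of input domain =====

-- ===== PORT A =====
-- B replaces A's insertion-order early-return scan with filter-then-argmax over (cost, rarity) pairs; same values everywhere.
def pvPricesA : List (String × Int) :=
  [("Mythic", 2000), ("Legendary", 1000), ("Epic", 800),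
   ("Rare", 600), ("Uncommon", 400), ("Common", 200)]

def pvLoopA : List (String × Int) → Int → String
  | [], _ => "None (Too Poor)"
  | (rarity, cost) :: rest, g => if g ≥ cost then rarity else pvLoopA rest g

def get_highest_affordable_rarity (current_gold : Int) : String :=
  pvLoopA pvPricesA current_gold

-- ===== PORT B =====
def pvPricesB : List (String × Int) :=
  [("Mythic", 2000), ("Legendary", 1000), ("Epic", 800),
   ("Rare", 600), ("Uncommon", 400), ("Common", 200)]

-- Python max over (int, str) tuples: lexicographic, first maximal element kept
def pvPairMax (b a : Int × String) : Int × String :=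
  if a.1 > b.1 ∨ (a.1 = b.1 ∧ a.2 > b.2) then a else b

def get_highest_affordable_rarity_alt (current_gold : Int) : String :=
  let affordable := (pvPricesB.filter (fun rc => rc.2 ≤ current_gold)).map
    (fun rc => (rc.2, rc.1))
  match affordable with
  | [] => "None (Too Poor)"
  | x :: xs => (xs.foldl pvPairMax x).2

-- ===== PRECONDITION & SPEC =====
def Spec_get_highest_affordable_rarity (current_gold : Int) (out : String) : Prop := out = get_highest_affordable_rarity_alt current_gold
instance (current_gold : Int) (out : String) : Decidable (Spec_get_highest_affordable_rarity current_gold out) := by unfold Spec_get_highest_affordable_rarity; infer_instance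

-- ===== CLAIM (what is proved, stated in full; the proofs are below) =====
def Claim_equal_get_highest_affordable_rarity : Prop := ∀ (current_gold : Int), Dom_get_highest_affordable_rarity current_gold → Spec_get_highest_affordable_rarity current_gold (get_highest_affordable_rarity current_gold)

-- ===== LEMMAS AND PROOFS =====

-- ===== VERDICT (by name: the statement is the Claim_ definition above) =====
theorem get_highest_affordable_rarity_spec : Claim_equal_get_highest_affordable_rarity := by
  intro g _
  unfold Spec_get_highest_affordable_rarity get_highest_affordable_rarity
    get_highest_affordable_rarity_alt pvPricesA pvPricesB pvLoopA
  by_cases h1 : (2000:Int) ≤ g <;> by_cases h2 : (1000:Int) ≤ g <;>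
    by_cases h3 : (800:Int) ≤ g <;> by_cases h4 : (600:Int) ≤ g <;>
    by_cases h5 : (400:Int) ≤ g <;> by_cases h6 : (200:Int) ≤ g <;>
    first
      | omega
      | simp [List.filter, pvPairMax, pvLoopA, h1, h2, h3, h4, h5, h6]
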